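-- pv_equiv track=rewrite | github.com/utkukaya/lung_cancer_prediction | src/scripts/regression_model.py | find_indexes
-- ===== SOURCE A (Python) =====
-- def find_indexes(array):
--     indexes = {
--         '0-18': [],
--         '18-36': [],
--         '36-96': [],
--         '96-120': [],
--         '120+': []
--     }
--
--     for i, num in enumerate(array):
--         if num < 18:
--             indexes['0-18'].append(i)
--         elif num < 36:
--             indexes['18-36'].append(i)
--         elif num < 96:
--             indexes['36-96'].append(i)
--         elif num < 120:
--             indexes['96-120'].append(i)
--         else:
--             indexes['120+'].append(i)
--
--     return indexes
-- ===== SOURCE B (Python) =====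
-- def find_indexes(array):
--     pairs = list(enumerate(array))
--     return {
--         '0-18':   [i for i, n in pairs if n < 18],
--         '18-36':  [i for i, n in pairs if 18 <= n < 36],
--         '36-96':  [i for i, n in pairs if 36 <= n < 96],
--         '96-120': [i for i, n in pairs if 96 <= n < 120],
--         '120+':   [i for i, n in pairs if n >= 120],
--     }
-- ===== Notes on version B (the rewrite author's own statement) =====
-- stated objective: idiomatic
-- what changed: Replaces the single mutating loop that dispatches each index through an if/elif cascade by five independent filtering comprehensions, one per range, assembled directly into the dict literal.
import Mathlib
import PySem

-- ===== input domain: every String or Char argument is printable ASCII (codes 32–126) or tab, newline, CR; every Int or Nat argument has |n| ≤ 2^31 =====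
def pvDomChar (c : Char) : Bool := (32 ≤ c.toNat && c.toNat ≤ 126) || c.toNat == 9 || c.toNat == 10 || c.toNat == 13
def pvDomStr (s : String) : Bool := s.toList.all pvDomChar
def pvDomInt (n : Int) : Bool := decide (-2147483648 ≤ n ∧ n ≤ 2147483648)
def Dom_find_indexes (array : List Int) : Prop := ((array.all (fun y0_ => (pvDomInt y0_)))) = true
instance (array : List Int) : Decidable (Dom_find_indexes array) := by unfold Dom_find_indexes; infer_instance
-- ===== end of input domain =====

-- B replaces A's single mutating if/elif loop by five independent per-range filtering passes assembled into the dict literal; idiomatic, same O(n) cost.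


-- ===== PORT A =====
def find_indexes (array : List Int) : List (String × List Int) :=
  let indexes : PySem.Dict String (List Int) :=
    PySem.Dict.ofList [("0-18", []), ("18-36", []), ("36-96", []), ("96-120", []), ("120+", [])]
  ((PySem.List.enumerate array).foldl
    (fun indexes p =>
      if p.2 < 18 then PySem.Dict.modify indexes "0-18" [] (· ++ [p.1])
      else if p.2 < 36 then PySem.Dict.modify indexes "18-36" [] (· ++ [p.1])
      else if p.2 < 96 then PySem.Dict.modify indexes "36-96" [] (· ++ [p.1])
      else if p.2 < 120 then PySem.Dict.modify indexes "96-120" [] (· ++ [p.1])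
      else PySem.Dict.modify indexes "120+" [] (· ++ [p.1]))
    indexes).items

-- ===== PORT B =====
def find_indexes_alt (array : List Int) : List (String × List Int) :=
  let pairs := PySem.List.enumerate array
  [("0-18",   (pairs.filter (fun p => p.2 < 18)).map (·.1)),
   ("18-36",  (pairs.filter (fun p => 18 ≤ p.2 && p.2 < 36)).map (·.1)),
   ("36-96",  (pairs.filter (fun p => 36 ≤ p.2 && p.2 < 96)).map (·.1)),
   ("96-120", (pairs.filter (fun p => 96 ≤ p.2 && p.2 < 120)).map (·.1)),
   ("120+",   (pairs.filter (fun p => 120 ≤ p.2)).map (·.1))]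

-- ===== PRECONDITION & SPEC =====
def Spec_find_indexes (array : List Int) (out : List (String × List Int)) : Prop := out = find_indexes_alt array
instance (array : List Int) (out : List (String × List Int)) : Decidable (Spec_find_indexes array out) := by unfold Spec_find_indexes; infer_instance

-- ===== CLAIM (what is proved, stated in full; the proofs are below) =====
def Claim_equal_find_indexes : Prop := ∀ (array : List Int), Dom_find_indexes array → Spec_find_indexes array (find_indexes array)

-- ===== LEMMAS AND PROOFS =====

-- modify on the literal five-key dict updates exactly the named entry (one lemma per key)
theorem find_indexes_mod0 (a b c d e v : List Int) :
    PySem.Dict.modify (PySem.Dict.mk [("0-18", a), ("18-36", b), ("36-96", c), ("96-120", d), ("120+", e)]) "0-18" [] (· ++ v)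
    = PySem.Dict.mk [("0-18", a ++ v), ("18-36", b), ("36-96", c), ("96-120", d), ("120+", e)] := rfl
theorem find_indexes_mod1 (a b c d e v : List Int) :
    PySem.Dict.modify (PySem.Dict.mk [("0-18", a), ("18-36", b), ("36-96", c), ("96-120", d), ("120+", e)]) "18-36" [] (· ++ v)
    = PySem.Dict.mk [("0-18", a), ("18-36", b ++ v), ("36-96", c), ("96-120", d), ("120+", e)] := rfl
theorem find_indexes_mod2 (a b c d e v : List Int) :
    PySem.Dict.modify (PySem.Dict.mk [("0-18", a), ("18-36", b), ("36-96", c), ("96-120", d), ("120+", e)]) "36-96" [] (· ++ v)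
    = PySem.Dict.mk [("0-18", a), ("18-36", b), ("36-96", c ++ v), ("96-120", d), ("120+", e)] := rfl
theorem find_indexes_mod3 (a b c d e v : List Int) :
    PySem.Dict.modify (PySem.Dict.mk [("0-18", a), ("18-36", b), ("36-96", c), ("96-120", d), ("120+", e)]) "96-120" [] (· ++ v)
    = PySem.Dict.mk [("0-18", a), ("18-36", b), ("36-96", c), ("96-120", d ++ v), ("120+", e)] := rfl
theorem find_indexes_mod4 (a b c d e v : List Int) :
    PySem.Dict.modify (PySem.Dict.mk [("0-18", a), ("18-36", b), ("36-96", c), ("96-120", d), ("120+", e)]) "120+" [] (· ++ v)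
    = PySem.Dict.mk [("0-18", a), ("18-36", b), ("36-96", c), ("96-120", d), ("120+", e ++ v)] := rfl

-- Invariant: A's fold over the literal 5-key dict appends to each value exactly the indices whose number falls in that key's range.
theorem find_indexes_fold_inv (l : List (Int × Int)) (a b c d e : List Int) :
    (l.foldl
      (fun indexes p =>
        if p.2 < 18 then PySem.Dict.modify indexes "0-18" [] (· ++ [p.1])
        else if p.2 < 36 then PySem.Dict.modify indexes "18-36" [] (· ++ [p.1])
        else if p.2 < 96 then PySem.Dict.modify indexes "36-96" [] (· ++ [p.1])
        else if p.2 < 120 then PySem.Dict.modify indexes "96-120" [] (· ++ [p.1])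
        else PySem.Dict.modify indexes "120+" [] (· ++ [p.1]))
      (PySem.Dict.mk [("0-18", a), ("18-36", b), ("36-96", c), ("96-120", d), ("120+", e)]))
    = PySem.Dict.mk
        [("0-18",   a ++ (l.filter (fun p => p.2 < 18)).map (·.1)),
         ("18-36",  b ++ (l.filter (fun p => 18 ≤ p.2 && p.2 < 36)).map (·.1)),
         ("36-96",  c ++ (l.filter (fun p => 36 ≤ p.2 && p.2 < 96)).map (·.1)),
         ("96-120", d ++ (l.filter (fun p => 96 ≤ p.2 && p.2 < 120)).map (·.1)),
         ("120+",   e ++ (l.filter (fun p => 120 ≤ p.2)).map (·.1))] := by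
  induction l generalizing a b c d e with
  | nil => simp
  | cons x xs ih =>
    rcases x with ⟨i, num⟩
    simp only [List.foldl_cons]
    by_cases h1 : num < 18
    · rw [if_pos h1, find_indexes_mod0, ih]
      simp [h1, show ¬(18 ≤ num) by omega, show ¬(36 ≤ num) by omega,
        show ¬(96 ≤ num) by omega, show ¬(120 ≤ num) by omega]
    · rw [if_neg h1]
      by_cases h2 : num < 36
      · rw [if_pos h2, find_indexes_mod1, ih]
        simp [h1, h2, show (18:Int) ≤ num by omega,
          show ¬(96 ≤ num) by omega, show ¬(120 ≤ num) by omega]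
      · rw [if_neg h2]
        by_cases h3 : num < 96
        · rw [if_pos h3, find_indexes_mod2, ih]
          simp [h1, h2, h3, show (18:Int) ≤ num by omega,
            show (36:Int) ≤ num by omega, show ¬(120 ≤ num) by omega]
        · rw [if_neg h3]
          by_cases h4 : num < 120
          · rw [if_pos h4, find_indexes_mod3, ih]
            simp [h1, h2, h3, h4, show (18:Int) ≤ num by omega,
              show (36:Int) ≤ num by omega, show (96:Int) ≤ num by omega]
          · rw [if_neg h4, find_indexes_mod4, ih]
            simp [h1, h2, h3, h4, show (18:Int) ≤ num by omega,
              show (36:Int) ≤ num by omega, show (96:Int) ≤ num by omega,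
              show (120:Int) ≤ num by omega]

-- ===== VERDICT (by name: the statement is the Claim_ definition above) =====
theorem find_indexes_spec : Claim_equal_find_indexes := by
  intro array _
  unfold Spec_find_indexes
  exact congrArg PySem.Dict.items
    (find_indexes_fold_inv (PySem.List.enumerate array) [] [] [] [] [])
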